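-- pv_equiv track=rewrite | github.com/GRD-Chang/Agent-Sync | src/task_bridge/dashboard/queries.py | _job_matches_view
-- ===== SOURCE A (Python) =====
-- from collections import Counter, defaultdict
--
-- ACTIVE_TASK_STATES = {"queued", "running"}
--
-- TERMINAL_TASK_STATES = {"done", "blocked", "failed"}
--
-- def _job_matches_view(
--
--     job: dict[str, object],
--     job_tasks: list[dict[str, object]],
--     selected_view: str,
-- ) -> bool:
--     counts = Counter(str(task.get("state") or "queued") for task in job_tasks)
--     if selected_view == "current":
--         return bool(job.get("is_current"))
--     if selected_view == "active":
--         return sum(counts.get(state, 0) for state in ACTIVE_TASK_STATES) > 0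
--     if selected_view == "terminal":
--         return sum(counts.get(state, 0) for state in TERMINAL_TASK_STATES) > 0
--     return True
-- ===== SOURCE B (Python) =====
-- ACTIVE_TASK_STATES = {"queued", "running"}
--
-- TERMINAL_TASK_STATES = {"done", "blocked", "failed"}
--
--
-- def _job_matches_view(job, job_tasks, selected_view):
--     if selected_view == "current":
--         return bool(job.get("is_current"))
--     if selected_view == "active":
--         return any(str(task.get("state") or "queued") in ACTIVE_TASK_STATES
--                    for task in job_tasks)
--     if selected_view == "terminal":
--         return any(str(task.get("state") or "queued") in TERMINAL_TASK_STATES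
--                    for task in job_tasks)
--     return True
-- ===== Notes on version B (the rewrite author's own statement) =====
-- stated objective: simpler
-- what changed: B drops the up-front Counter frequency table: instead of counting every task state and summing selected counts, it scans the tasks directly with a short-circuiting any() membership test per view.
import Mathlib
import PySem

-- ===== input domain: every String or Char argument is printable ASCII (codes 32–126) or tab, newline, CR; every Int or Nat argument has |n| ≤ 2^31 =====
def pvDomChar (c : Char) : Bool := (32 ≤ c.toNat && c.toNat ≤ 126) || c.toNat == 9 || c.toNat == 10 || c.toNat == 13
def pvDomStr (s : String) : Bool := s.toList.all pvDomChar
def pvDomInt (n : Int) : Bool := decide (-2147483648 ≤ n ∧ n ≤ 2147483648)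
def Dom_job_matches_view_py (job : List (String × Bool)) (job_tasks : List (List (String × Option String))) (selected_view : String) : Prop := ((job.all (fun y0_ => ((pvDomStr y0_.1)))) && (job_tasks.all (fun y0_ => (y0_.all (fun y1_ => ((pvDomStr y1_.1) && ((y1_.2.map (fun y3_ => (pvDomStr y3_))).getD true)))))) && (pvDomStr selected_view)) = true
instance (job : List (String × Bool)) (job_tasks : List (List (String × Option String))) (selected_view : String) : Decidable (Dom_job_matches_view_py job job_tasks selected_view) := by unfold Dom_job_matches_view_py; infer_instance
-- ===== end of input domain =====

-- B replaces A's Counter-then-sum with a direct short-circuiting scan of the tasks (simpler; same result).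
-- ===== PORT A =====
-- str(task.get("state") or "queued"): missing key or None or "" -> "queued", else the string itself
def pvStateOf (task : List (String × Option String)) : String :=
  match (PySem.Dict.mk task).get? "state" with
  | some (some s) => if s == "" then "queued" else s
  | _ => "queued"

def job_matches_view_py (job : List (String × Bool)) (job_tasks : List (List (String × Option String))) (selected_view : String) : Bool :=
  let counts := PySem.Dict.counter (job_tasks.map pvStateOf)
  if selected_view == "current" then
    ((PySem.Dict.mk job).get? "is_current").getD false
  else if selected_view == "active" then
    decide (counts.getD "queued" 0 + counts.getD "running" 0 > 0)
  else if selected_view == "terminal" then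
    decide (counts.getD "done" 0 + counts.getD "blocked" 0 + counts.getD "failed" 0 > 0)
  else true

-- ===== PORT B =====
def pvActiveStates : List String := PySem.Set.ofList ["queued", "running"]
def pvTerminalStates : List String := PySem.Set.ofList ["done", "blocked", "failed"]

def job_matches_view_py_alt (job : List (String × Bool)) (job_tasks : List (List (String × Option String))) (selected_view : String) : Bool :=
  if selected_view == "current" then
    ((PySem.Dict.mk job).get? "is_current").getD false
  else if selected_view == "active" then
    job_tasks.any (fun task => pvActiveStates.contains (pvStateOf task))
  else if selected_view == "terminal" then
    job_tasks.any (fun task => pvTerminalStates.contains (pvStateOf task))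
  else true

-- ===== PRECONDITION & SPEC =====
def Spec_job_matches_view_py (job : List (String × Bool)) (job_tasks : List (List (String × Option String))) (selected_view : String) (out : Bool) : Prop := out = job_matches_view_py_alt job job_tasks selected_view
instance (job : List (String × Bool)) (job_tasks : List (List (String × Option String))) (selected_view : String) (out : Bool) : Decidable (Spec_job_matches_view_py job job_tasks selected_view out) := by unfold Spec_job_matches_view_py; infer_instance

-- ===== CLAIM (what is proved, stated in full; the proofs are below) =====
def Claim_equal_job_matches_view_py : Prop := ∀ (job : List (String × Bool)) (job_tasks : List (List (String × Option String))) (selected_view : String), Dom_job_matches_view_py job job_tasks selected_view → Spec_job_matches_view_py job job_tasks selected_view (job_matches_view_py job job_tasks selected_view)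

-- ===== LEMMAS AND PROOFS =====
-- a positive sum of counts over a list of states = some element of xs lies among those states
theorem counts_pos_iff_any (xs : List String) (S : List String) :
    decide (0 < (S.map (fun s => ((xs.count s : Int)))).sum) = xs.any (fun s => S.contains s) := by
  have h2 : (S.map (fun s => ((xs.count s : Int)))).sum = ((S.map (fun s => xs.count s)).sum : Int) := by
    induction S with
    | nil => simp
    | cons a S ih => simp only [List.map_cons, List.sum_cons, ih]; push_cast; ring
  have h : (0 < ((S.map (fun s => xs.count s)).sum : Int)) ↔ ∃ s ∈ S, s ∈ xs := by
    rw [Int.natCast_pos, Nat.pos_iff_ne_zero, Ne, List.sum_eq_zero_iff]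
    push Not
    constructor
    · rintro ⟨n, hn, hne⟩
      rcases List.mem_map.mp hn with ⟨s, hs, rfl⟩
      exact ⟨s, hs, List.count_pos_iff.mp (Nat.pos_of_ne_zero hne)⟩
    · rintro ⟨s, hs, hmem⟩
      exact ⟨xs.count s, List.mem_map.mpr ⟨s, hs, rfl⟩, Nat.pos_iff_ne_zero.mp (List.count_pos_iff.mpr hmem)⟩
  rw [h2, Bool.eq_iff_iff, decide_eq_true_eq, List.any_eq_true, h]
  constructor
  · rintro ⟨s, h1, h2⟩; exact ⟨s, h2, by simpa using h1⟩
  · rintro ⟨s, h1, h2⟩; exact ⟨s, by simpa using h2, h1⟩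

-- ===== VERDICT (by name: the statement is the Claim_ definition above) =====
theorem job_matches_view_py_spec : Claim_equal_job_matches_view_py := by
  intro job job_tasks selected_view _
  unfold Spec_job_matches_view_py job_matches_view_py job_matches_view_py_alt
  simp only [pvActiveStates, pvTerminalStates]
  split_ifs with h1 h2 h3 <;> try rfl
  · have := counts_pos_iff_any (job_tasks.map pvStateOf) ["queued", "running"]
    simp only [List.map_cons, List.map_nil, List.sum_cons, List.sum_nil, add_zero,
      PySem.Dict.getD_counter, List.any_map] at this ⊢
    rw [this]; rfl
  · have := counts_pos_iff_any (job_tasks.map pvStateOf) ["done", "blocked", "failed"]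
    simp only [List.map_cons, List.map_nil, List.sum_cons, List.sum_nil, add_zero,
      PySem.Dict.getD_counter, List.any_map] at this ⊢
    rw [← add_assoc] at this
    rw [this]; rfl
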